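-- pv_equiv track=rewrite | github.com/cooperbench/CooperBench | scripts/check_gold_conflicts.py | filter_test_files
-- ===== SOURCE A (Python) =====
-- def filter_test_files(patch_content: str) -> str:
--     """Filter test files from patch content."""
--     if not patch_content:
--         return patch_content
--
--     filtered_lines = []
--     skip = False
--     for line in patch_content.split("\n"):
--         if line.startswith("diff --git"):
--             skip = any(
--                 p in line
--                 for p in ["/test_", "/tests/", "_test.py", "/test/", "tests.py"]
--             )
--         if not skip:
--             filtered_lines.append(line)
--
--     result = "\n".join(filtered_lines)
--     if result and not result.endswith("\n"):
--         result += "\n"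
--     return result
-- ===== SOURCE B (Python) =====
-- HDR = "diff --git"
-- MARKERS = ["/test_", "/tests/", "_test.py", "/test/", "tests.py"]
--
--
-- def _body_len(lines):
--     """Number of leading lines that are not diff headers."""
--     n = 0
--     while n < len(lines) and not lines[n].startswith(HDR):
--         n += 1
--     return n
--
--
-- def _sections(lines):
--     """Split lines (whose first line is a diff header) into header-led sections."""
--     if not lines:
--         return []
--     n = 1 + _body_len(lines[1:])
--     return [lines[:n]] + _sections(lines[n:])
--
--
-- def filter_test_files(patch_content: str) -> str:
--     """Filter test files from patch content."""
--     if not patch_content: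
--         return patch_content
--
--     lines = patch_content.split("\n")
--     k = _body_len(lines)
--     preamble, rest = lines[:k], lines[k:]
--     kept = preamble + [
--         ln
--         for sec in _sections(rest)
--         if not any(m in sec[0] for m in MARKERS)
--         for ln in sec
--     ]
--
--     result = "\n".join(kept)
--     if result and not result.endswith("\n"):
--         result += "\n"
--     return result
-- ===== Notes on version B (the rewrite author's own statement) =====
-- stated objective: alternative
-- what changed: Instead of a single stateful pass carrying a skip flag, B splits the lines into a preamble plus header-led sections, filters out the sections whose header contains a test marker, and flattens the kept sections back.
import Mathlib
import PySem

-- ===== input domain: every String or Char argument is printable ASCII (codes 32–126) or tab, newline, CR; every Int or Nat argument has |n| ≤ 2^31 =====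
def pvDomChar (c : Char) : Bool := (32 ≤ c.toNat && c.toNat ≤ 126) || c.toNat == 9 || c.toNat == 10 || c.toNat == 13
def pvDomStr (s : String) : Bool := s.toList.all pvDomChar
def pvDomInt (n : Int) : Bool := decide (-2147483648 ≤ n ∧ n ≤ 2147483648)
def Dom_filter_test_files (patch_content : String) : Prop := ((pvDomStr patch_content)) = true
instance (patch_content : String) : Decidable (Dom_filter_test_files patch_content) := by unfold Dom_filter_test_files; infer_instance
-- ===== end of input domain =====

-- B replaces A's single stateful skip-flag pass by group-then-filter: split into preamble + header-led
-- sections, drop the sections whose header contains a test marker, flatten back (alternative decomposition).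

def pvMarkers : List String := ["/test_", "/tests/", "_test.py", "/test/", "tests.py"]

-- ===== PORT A =====
def filter_test_files (patch_content : String) : String :=
  if patch_content == "" then patch_content
  else
    let step : (List String × Bool) → String → (List String × Bool) := fun st line =>
      let skip := if PySem.Str.startswith line "diff --git"
                  then pvMarkers.any (fun p => PySem.Str.isIn p line)
                  else st.2
      ((if !skip then st.1 ++ [line] else st.1), skip)
    let fl := ((PySem.Str.split? patch_content "\n").getD []).foldl step ([], false)
    let result := PySem.Str.join "\n" fl.1
    if result != "" && !(PySem.Str.endswith result "\n") then result ++ "\n" else result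

-- ===== PORT B =====
def pvIsHeader (line : String) : Bool := PySem.Str.startswith line "diff --git"

def pvMarked (line : String) : Bool := pvMarkers.any (fun p => PySem.Str.isIn p line)

-- _body_len + slicing = takeWhile/dropWhile on the leading non-header run
def pvSections : List String → List (List String)
  | [] => []
  | h :: rest =>
      (h :: rest.takeWhile (fun l => !pvIsHeader l)) ::
        pvSections (rest.dropWhile (fun l => !pvIsHeader l))
termination_by ls => ls.length
decreasing_by
  simp only [List.length_cons]
  exact Nat.lt_succ_of_le (List.length_dropWhile_le _ _)

def filter_test_files_alt (patch_content : String) : String :=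
  if patch_content == "" then patch_content
  else
    let lines := (PySem.Str.split? patch_content "\n").getD []
    let preamble := lines.takeWhile (fun l => !pvIsHeader l)
    let rest := lines.dropWhile (fun l => !pvIsHeader l)
    let kept := preamble ++
      ((pvSections rest).filter (fun sec => !pvMarked (sec.headD ""))).flatten
    let result := PySem.Str.join "\n" kept
    if result != "" && !(PySem.Str.endswith result "\n") then result ++ "\n" else result

-- ===== PRECONDITION & SPEC =====
def Spec_filter_test_files (patch_content : String) (out : String) : Prop := out = filter_test_files_alt patch_content
instance (patch_content : String) (out : String) : Decidable (Spec_filter_test_files patch_content out) := by unfold Spec_filter_test_files; infer_instance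

-- ===== CLAIM (what is proved, stated in full; the proofs are below) =====
def Claim_equal_filter_test_files : Prop := ∀ (patch_content : String), Dom_filter_test_files patch_content → Spec_filter_test_files patch_content (filter_test_files patch_content)

-- ===== LEMMAS AND PROOFS =====

-- A's loop, written as a recursion producing only the appended lines
def pvARec : List String → Bool → List String
  | [], _ => []
  | l :: ls, skip =>
      if pvIsHeader l then
        (if pvMarked l then [] else [l]) ++ pvARec ls (pvMarked l)
      else
        (if skip then [] else [l]) ++ pvARec ls skip

lemma pvFoldl_eq_aRec (ls : List String) (acc : List String) (skip : Bool) :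
    (ls.foldl (fun st line =>
        ((if !(if pvIsHeader line then pvMarked line else st.2) then st.1 ++ [line] else st.1),
         if pvIsHeader line then pvMarked line else st.2)) (acc, skip)).1
      = acc ++ pvARec ls skip := by
  induction ls generalizing acc skip with
  | nil => simp [pvARec]
  | cons l ls ih =>
      simp only [List.foldl_cons]
      rw [ih]
      cases hh : pvIsHeader l
      · cases skip <;> simp [pvARec, hh]
      · cases hm : pvMarked l <;> simp [pvARec, hh, hm]

lemma pvARec_eq_sections (ls : List String) (skip : Bool) :
    pvARec ls skip
      = (if skip then [] else ls.takeWhile (fun l => !pvIsHeader l)) ++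
        ((pvSections (ls.dropWhile (fun l => !pvIsHeader l))).filter
          (fun sec => !pvMarked (sec.headD ""))).flatten := by
  induction ls generalizing skip with
  | nil => cases skip <;> simp [pvARec, pvSections]
  | cons l ls ih =>
      by_cases hl : pvIsHeader l = true
      · rw [pvARec, if_pos hl, ih (pvMarked l)]
        have htw : (l :: ls).takeWhile (fun l => !pvIsHeader l) = [] := by
          simp [List.takeWhile, hl]
        have hdw : (l :: ls).dropWhile (fun l => !pvIsHeader l) = l :: ls := by
          simp [List.dropWhile, hl]
        rw [htw, hdw, pvSections]
        by_cases hm : pvMarked l = true <;> cases skip <;> simp [hm]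
      · have hl0 : pvIsHeader l = false := by simpa using hl
        rw [pvARec, if_neg (by simp [hl0]), ih skip]
        have htw : (l :: ls).takeWhile (fun l => !pvIsHeader l)
            = l :: ls.takeWhile (fun l => !pvIsHeader l) := by
          simp [List.takeWhile, hl0]
        have hdw : (l :: ls).dropWhile (fun l => !pvIsHeader l)
            = ls.dropWhile (fun l => !pvIsHeader l) := by
          simp [List.dropWhile, hl0]
        rw [htw, hdw]
        cases skip <;> simp

lemma pvKept_eq (ls : List String) :
    (ls.foldl (fun st line =>
        let s := if PySem.Str.startswith line "diff --git"
                 then pvMarkers.any (fun p => PySem.Str.isIn p line)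
                 else st.2
        ((if !s then st.1 ++ [line] else st.1), s)) ([], false)).1
      = ls.takeWhile (fun l => !pvIsHeader l) ++
        ((pvSections (ls.dropWhile (fun l => !pvIsHeader l))).filter
          (fun sec => !pvMarked (sec.headD ""))).flatten := by
  -- the Str-level step function is definitionally the pvIsHeader/pvMarked step
  exact (pvFoldl_eq_aRec ls [] false).trans (by rw [pvARec_eq_sections]; simp)

-- ===== VERDICT (by name: the statement is the Claim_ definition above) =====
theorem filter_test_files_spec : Claim_equal_filter_test_files := by
  intro s _
  unfold Spec_filter_test_files filter_test_files filter_test_files_alt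
  by_cases h : (s == "") = true
  · simp [h]
  · simp only [h, Bool.false_eq_true, if_false, pvKept_eq]
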